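-- pv_equiv track=rewrite | github.com/ktj4820/Lab_OCR | OpenCV/row_split.py | image_row_split
-- ===== SOURCE A (Python) =====
-- def image_row_split(image):
--     # 假设背景色是255（即白色）
--     bg_color = 255
--     row_length = len(image)
--     column_length = len(image[0])
--
--     is_last_blank_row = True    # 是最后的空白行（背景色）
--     '''针对每行，检测该行中的各列元素，如果是白色（背景色），则通过，如果首次出现黑色，证明该行出现了字符，将
--     其判定为字符行，在该字符行的上一行进行划线（通过将上一行像素转换为黑色0像素点），
--     赋值is_last_blank_row = False，转到下一行is_row_blank 再次赋值为True，则当再次出现字符行的时候，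
--     is_row_blank = False， 满足 is_last_blank_row == is_row_blank，直接pass，直到最后
--     is_row_blank = True，即该行为背景行的时候，才会出现is_last_blank_row ！= is_row_blank，
--     然后再次对该行进行划线（转换该行颜色为背景色）'''
--     for row in range(0, row_length):
--         is_row_blank = True
--         for column in range(0, column_length):
--             if image[row][column] == bg_color:
--                 pass
--             else:
--                 is_row_blank = False
--                 break
--
--         if is_last_blank_row == is_row_blank:
--             pass
--         else:
--             if is_row_blank == False:
--                 image[row - 1] = [0 for column in range(0, column_length)]    # 在首次出现字符行的前一行进行划线
--             else:
--                 image[row] = [0 for column in range(0, column_length)]    # 在不再是字符行的时候进行划线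
--
--             is_last_blank_row = is_row_blank
--
--     return image
-- ===== SOURCE B (Python) =====
-- def image_row_split(image):
--     # Run-based scan: find each maximal block of text rows and draw a black
--     # separator line on the row just above the block and on the row just below it.
--     column_length = len(image[0])
--     n = len(image)
--
--     def blank(row):
--         return all(px == 255 for px in image[row][:column_length])
--
--     row = 0
--     while row < n:
--         if blank(row):
--             row += 1
--             continue
--         image[row - 1] = [0] * column_length   # line above the text block
--         while row < n and not blank(row):
--             row += 1
--         if row < n:
--             image[row] = [0] * column_length   # line below the text block
--             row += 1
--     return image
-- ===== Notes on version B (the rewrite author's own statement) =====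
-- stated objective: alternative
-- what changed: A is a per-row state machine (blank/text flag, inner pixel loop with break, transition-triggered writes); B is a run-finder that scans for each maximal block of consecutive text rows and draws the separator line just above and just below the block; Pre_ excludes the inputs where A raises IndexError (empty image, or a row shorter than the first row whose pixels are all 255 and which is not replaced by the first write before being scanned).
import Mathlib
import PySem

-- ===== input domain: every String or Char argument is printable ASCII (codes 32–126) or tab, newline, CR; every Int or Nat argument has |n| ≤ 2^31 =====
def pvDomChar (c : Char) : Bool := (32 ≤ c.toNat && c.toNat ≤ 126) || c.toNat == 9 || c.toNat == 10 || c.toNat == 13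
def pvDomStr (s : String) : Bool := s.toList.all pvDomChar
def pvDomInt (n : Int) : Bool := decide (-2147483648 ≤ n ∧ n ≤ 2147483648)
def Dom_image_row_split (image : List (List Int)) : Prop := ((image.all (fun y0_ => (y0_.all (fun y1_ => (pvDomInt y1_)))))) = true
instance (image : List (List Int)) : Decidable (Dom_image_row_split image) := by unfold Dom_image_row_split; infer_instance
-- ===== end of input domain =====

-- B replaces A's per-row state machine (flag + inner pixel loop with break) by a
-- run-finder: it scans for each maximal block of text rows and draws the separator
-- lines just above and just below the block. Both A and B mutate `image` in place;
-- the equivalence proved is about the RETURN value.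

-- ===== PORT A =====
-- [0 for column in range(0, column_length)]
def pvZerosRow (m : Nat) : List Int :=
  (PySem.List.pyRange 0 (m : Int) 1).map (fun _ => (0 : Int))

def pvRowBlank (r : List Int) (cols : List Int) : Bool :=
  match cols with
  | [] => true
  | c :: rest => if PySem.List.pyGetD r c 0 = 255 then pvRowBlank r rest else false

def pvStepA (m : Nat) (st : List (List Int) × Bool) (row : Int) : List (List Int) × Bool :=
  let isRowBlank := pvRowBlank (PySem.List.pyGetD st.1 row [])
      (PySem.List.pyRange 0 (m : Int) 1)
  if st.2 = isRowBlank then st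
  else if isRowBlank = false then
    (PySem.List.pySetD st.1 (row - 1) (pvZerosRow m), isRowBlank)
  else
    (PySem.List.pySetD st.1 row (pvZerosRow m), isRowBlank)

def image_row_split (image : List (List Int)) : List (List Int) :=
  let rowLength := image.length
  let columnLength := (PySem.List.pyGetD image 0 []).length
  ((PySem.List.pyRange 0 (rowLength : Int) 1).foldl (pvStepA columnLength) (image, true)).1

-- ===== PORT B =====
-- all(px == 255 for px in image[row][:column_length])
def pvIsBlankB (m : Nat) (img : List (List Int)) (row : Nat) : Bool :=
  (PySem.List.slice (PySem.List.pyGetD img (row : Int) []) (some 0) (some (m : Int))).all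
    (fun px => px = 255)

-- inner `while row < n and not blank(row): row += 1`
def pvConsumeB (m n : Nat) (img : List (List Int)) (row : Nat) : Nat :=
  if row < n ∧ pvIsBlankB m img row = false then pvConsumeB m n img (row + 1) else row
termination_by n - row
decreasing_by omega

-- needed by pvOuterB's termination proof
theorem pvConsumeB_ge (m n : Nat) (img : List (List Int)) :
    ∀ d row, n - row ≤ d → row ≤ pvConsumeB m n img row := by
  intro d
  induction d with
  | zero =>
    intro row hd
    rw [pvConsumeB]
    split
    next h => omega
    next => exact le_refl _
  | succ d' ih =>
    intro row hd
    rw [pvConsumeB]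
    split
    next h => exact le_trans (by omega) (ih (row + 1) (by omega))
    next => exact le_refl _

-- outer `while row < n: …`
def pvOuterB (m n : Nat) (img : List (List Int)) (row : Nat) : List (List Int) :=
  if h : row < n then
    if pvIsBlankB m img row then pvOuterB m n img (row + 1)
    else
      if hj : pvConsumeB m n (PySem.List.pySetD img ((row : Int) - 1) (List.replicate m (0 : Int))) row < n then
        pvOuterB m n
          (PySem.List.pySetD (PySem.List.pySetD img ((row : Int) - 1) (List.replicate m (0 : Int)))
            ((pvConsumeB m n (PySem.List.pySetD img ((row : Int) - 1) (List.replicate m (0 : Int))) row : Nat) : Int)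
            (List.replicate m (0 : Int)))
          (pvConsumeB m n (PySem.List.pySetD img ((row : Int) - 1) (List.replicate m (0 : Int))) row + 1)
      else PySem.List.pySetD img ((row : Int) - 1) (List.replicate m (0 : Int))
  else img
termination_by n - row
decreasing_by
  · omega
  · have hge := pvConsumeB_ge m n
      (PySem.List.pySetD img ((row : Int) - 1) (List.replicate m (0 : Int))) (n - row) row (le_refl _)
    omega

def image_row_split_alt (image : List (List Int)) : List (List Int) :=
  let columnLength := (PySem.List.pyGetD image 0 []).length
  let n := image.length
  pvOuterB columnLength n image 0

-- ===== PRECONDITION & SPEC =====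
-- Pre_ excludes exactly the inputs where the Python A raises IndexError: the empty
-- image (len(image[0])) and images where the column scan runs past the end of a row
-- shorter than the first row, i.e. some row is short with all its pixels 255 —
-- unless it is the last row and the first row contains text, in which case A's
-- wrap-around write replaces the last row before it is ever scanned.
def Pre_image_row_split (image : List (List Int)) : Prop :=
  image ≠ [] ∧ ∀ i : Nat, i < image.length →
    (image.headI.length ≤ (image.getD i []).length ∨ ∃ px ∈ image.getD i [], px ≠ 255) ∨
    (i = image.length - 1 ∧ 1 < image.length ∧ ∃ px ∈ image.headI, px ≠ 255)
instance (image : List (List Int)) : Decidable (Pre_image_row_split image) := by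
  unfold Pre_image_row_split; infer_instance

def pvWitness_image_row_split : List (List Int) := [[255, 255], [0, 255], [255, 255]]

def Spec_image_row_split (image : List (List Int)) (out : List (List Int)) : Prop := out = image_row_split_alt image
instance (image : List (List Int)) (out : List (List Int)) : Decidable (Spec_image_row_split image out) := by unfold Spec_image_row_split; infer_instance

-- ===== CLAIM (what is proved, stated in full; the proofs are below) =====
def Claim_equal_image_row_split : Prop := ∀ (image : List (List Int)), Dom_image_row_split image → Pre_image_row_split image → Spec_image_row_split image (image_row_split image)

-- ===== LEMMAS AND PROOFS =====
-- proof-side characterisation of A's loop: pvB j = "row j of the original image is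
-- blank", pvB' folds in the wrap-around write at image[-1] (a text first row blanks
-- out the last row before it is classified), pvPrev is the loop state entering step
-- i, pvZeroedBy i j = "some step < i overwrote row j with zeros", pvImgAt i = the
-- list held by A's loop after i steps.
def pvBlank (m : Nat) (row : List Int) : Bool :=
  (PySem.List.slice row (some 0) (some (m : Int))).all (fun px => px = 255)

def pvB (image : List (List Int)) (j : Nat) : Bool :=
  pvBlank image.headI.length (image.getD j [])

def pvB' (image : List (List Int)) (j : Nat) : Bool :=
  if j = image.length - 1 ∧ 1 < image.length ∧ pvB image 0 = false then false
  else pvB image j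

def pvPrev (image : List (List Int)) (i : Nat) : Bool :=
  if i = 0 then true else pvB' image (i - 1)

def pvZeroedBy (image : List (List Int)) (i j : Nat) : Bool :=
  (pvB' image j && decide (j + 1 < i) && !(pvB' image (j + 1))) ||
  (pvB' image j && decide (0 < j ∧ j < i) && !(pvB' image (j - 1))) ||
  (decide (j = image.length - 1 ∧ 0 < i) && !(pvB image 0))

def pvImgAt (image : List (List Int)) (i : Nat) : List (List Int) :=
  (List.range image.length).map (fun j =>
    if pvZeroedBy image i j then pvZerosRow image.headI.length else image.getD j [])

theorem pvZerosRow_eq (m : Nat) : pvZerosRow m = List.replicate m 0 := by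
  induction m with
  | zero => rfl
  | succ k ih =>
    unfold pvZerosRow
    rw [show ((k+1 : Nat) : Int) = (k : Int) + 1 by push_cast; ring]
    rw [PySem.List.pyRange_one_succ_right (by omega)]
    simp only [List.map_append, List.map_cons, List.map_nil]
    rw [show (PySem.List.pyRange 0 (k:Int) 1).map (fun _ => (0:Int)) = pvZerosRow k from rfl, ih]
    simp [List.replicate_succ']

theorem pvBlank_eq_take (m : Nat) (r : List Int) :
    pvBlank m r = (r.take m).all (fun px => decide (px = 255)) := by
  unfold pvBlank
  rw [show (some (0:Int)) = some ((0:Nat):Int) by norm_num, PySem.List.slice_natCast]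
  simp

theorem pvRowBlank_append (r : List Int) (cols : List Int) (c : Int) :
    pvRowBlank r (cols ++ [c]) =
      (pvRowBlank r cols && decide (PySem.List.pyGetD r c 0 = 255)) := by
  induction cols with
  | nil => simp only [List.nil_append, pvRowBlank]; split <;> simp_all
  | cons x xs ih =>
    simp only [List.cons_append, pvRowBlank, ih]
    split <;> simp_all

theorem pvRowBlank_eq_pvBlank (m : Nat) (r : List Int) (h : m ≤ r.length) :
    pvRowBlank r (PySem.List.pyRange 0 (m : Int) 1) = pvBlank m r := by
  rw [pvBlank_eq_take]
  induction m with
  | zero => rfl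
  | succ k ih =>
    rw [show ((k+1 : Nat) : Int) = (k : Int) + 1 by push_cast; ring,
      PySem.List.pyRange_one_succ_right (by omega), pvRowBlank_append,
      ih (by omega)]
    rw [List.take_add_one, List.all_append]
    simp [List.getElem?_eq_getElem ((by omega : k < r.length))]

theorem pySetD_neg_one {α : Type} (xs : List α) (h : xs ≠ []) (v : α) :
    PySem.List.pySetD xs (-1) v = xs.set (xs.length - 1) v := by
  have hlen : 0 < xs.length := List.length_pos_iff.mpr h
  unfold PySem.List.pySetD PySem.List.pySet? PySem.List.pyIdx?
  rw [if_neg (by omega : ¬ (0:Int) ≤ -1), if_pos (by omega : -(xs.length:Int) ≤ -1)]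
  simp only [Option.map_some, Option.getD_some]
  norm_num

theorem pvB'_zero (image : List (List Int)) : pvB' image 0 = pvB image 0 := by
  unfold pvB'
  rw [if_neg]
  rintro ⟨h1, h2, _⟩
  omega

theorem pvImgAt_zero (image : List (List Int)) : pvImgAt image 0 = image := by
  apply List.ext_getElem
  · simp [pvImgAt]
  · intro i h1 h2
    simp [pvImgAt, pvZeroedBy, List.getD_eq_getElem?_getD, List.getElem?_eq_getElem h2]

theorem pvB_zero_false_pos (image : List (List Int)) (h : pvB image 0 = false) :
    0 < image.headI.length := by
  by_contra hm
  have hm0 : image.headI.length = 0 := by omega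
  simp [pvB, pvBlank_eq_take, hm0] at h

-- read row i at time i

theorem pvImgAt_read (image : List (List Int)) (i : Nat) (hi : i < image.length) :
    PySem.List.pyGetD (pvImgAt image i) (i : Int) [] =
      (if i = image.length - 1 ∧ 0 < i ∧ pvB image 0 = false then
        pvZerosRow image.headI.length else image.getD i []) := by
  rw [PySem.List.pyGetD_natCast]
  rw [List.getD_eq_getElem?_getD]
  rw [List.getElem?_eq_getElem (by simp [pvImgAt]; omega)]
  simp only [pvImgAt, List.getElem_map, List.getElem_range, Option.getD_some]
  congr 1
  simp only [pvZeroedBy]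
  have h1 : decide (i + 1 < i) = false := by simp
  have h2 : decide (0 < i ∧ i < i) = false := by simp
  simp only [h1, h2, Bool.and_false, Bool.false_and, Bool.false_or]
  by_cases hc : i = image.length - 1 ∧ 0 < i ∧ pvB image 0 = false
  · simp [hc.1, hc.2.2]
  · simp only [eq_iff_iff]
    constructor
    · intro h
      simp only [Bool.and_eq_true, decide_eq_true_eq, Bool.not_eq_eq_eq_not, Bool.not_true] at h
      exact absurd ⟨h.1.1, h.1.2, h.2⟩ hc
    · intro h; exact absurd h hc

theorem pvRowBlank_eq_all (r : List Int) (cols : List Int) :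
    pvRowBlank r cols = cols.all (fun c => decide (PySem.List.pyGetD r c 0 = 255)) := by
  induction cols with
  | nil => rfl
  | cons c rest ih =>
    simp only [pvRowBlank, List.all_cons]
    split
    next h => rw [ih, decide_eq_true h]; simp
    next h => rw [decide_eq_false h]; simp

theorem pvRowBlank_eq_pvBlank_safe (m : Nat) (r : List Int)
    (h : m ≤ r.length ∨ ∃ px ∈ r, px ≠ 255) :
    pvRowBlank r (PySem.List.pyRange 0 (m : Int) 1) = pvBlank m r := by
  by_cases hm : m ≤ r.length
  · exact pvRowBlank_eq_pvBlank m r hm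
  · obtain ⟨px, hmem, hne⟩ := h.resolve_left hm
    obtain ⟨k, hk, hpx⟩ := List.mem_iff_getElem.mp hmem
    have hleft : pvRowBlank r (PySem.List.pyRange 0 (m : Int) 1) = false := by
      rw [pvRowBlank_eq_all]
      apply List.all_eq_false.mpr
      refine ⟨(k : Int), PySem.List.mem_pyRange_one.mpr (by omega), ?_⟩
      rw [PySem.List.pyGetD_natCast, List.getD_eq_getElem?_getD,
        List.getElem?_eq_getElem hk]
      simpa [hpx] using hne
    have hright : pvBlank m r = false := by
      rw [pvBlank_eq_take, List.take_of_length_le (by omega)]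
      apply List.all_eq_false.mpr
      exact ⟨px, hmem, by simpa using hne⟩
    rw [hleft, hright]

theorem pvReadBlank (image : List (List Int))
    (hlen : ∀ i : Nat, i < image.length →
      (image.headI.length ≤ (image.getD i []).length ∨ ∃ px ∈ image.getD i [], px ≠ 255) ∨
      (i = image.length - 1 ∧ 1 < image.length ∧ ∃ px ∈ image.headI, px ≠ 255)) (i : Nat) (hi : i < image.length) :
    pvRowBlank (PySem.List.pyGetD (pvImgAt image i) (i : Int) [])
      (PySem.List.pyRange 0 (image.headI.length : Int) 1) = pvB' image i := by
  rw [pvImgAt_read image i hi]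
  by_cases hc : i = image.length - 1 ∧ 0 < i ∧ pvB image 0 = false
  · rw [if_pos hc]
    have hm0 : 0 < image.headI.length := pvB_zero_false_pos image hc.2.2
    rw [pvZerosRow_eq, pvRowBlank_eq_pvBlank _ _ (by simp), pvBlank_eq_take]
    have hb' : pvB' image i = false := by
      unfold pvB'; rw [if_pos ⟨hc.1, by omega, hc.2.2⟩]
    rw [hb', List.take_replicate]
    cases hm : image.headI.length with
    | zero => omega
    | succ k => simp [List.replicate_succ]
  · rw [if_neg hc]
    have hsafe : image.headI.length ≤ (image.getD i []).length ∨
        ∃ px ∈ image.getD i [], px ≠ 255 := by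
      rcases hlen i hi with h | ⟨h1, h2, px, hmem, hne⟩
      · exact h
      · exfalso
        apply hc
        refine ⟨h1, by omega, ?_⟩
        unfold pvB
        rw [pvBlank_eq_take]
        have hh : image.getD 0 [] = image.headI := by
          cases image with
          | nil => simp at hi
          | cons x xs => rfl
        rw [hh, List.take_length]
        exact List.all_eq_false.mpr ⟨px, hmem, by simpa using hne⟩
    rw [pvRowBlank_eq_pvBlank_safe _ _ hsafe]
    unfold pvB' pvB
    rw [if_neg]
    rintro ⟨h1, h2, h3⟩
    exact hc ⟨h1, by omega, h3⟩

theorem pvZeroedBy_succ_of_eq (image : List (List Int)) (i : Nat)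
    (h : pvPrev image i = pvB' image i) (j : Nat) :
    pvZeroedBy image (i + 1) j = pvZeroedBy image i j := by
  have hC : (decide (j = image.length - 1 ∧ 0 < i + 1) && !(pvB image 0))
      = (decide (j = image.length - 1 ∧ 0 < i) && !(pvB image 0)) := by
    by_cases hi : 0 < i
    · have he : (j = image.length - 1 ∧ 0 < i + 1) ↔ (j = image.length - 1 ∧ 0 < i) := by
        constructor <;> (rintro ⟨a, b⟩; exact ⟨a, by omega⟩)
      rw [decide_eq_decide.mpr he]
    · have hi0 : i = 0 := by omega
      have hb0 : pvB image 0 = true := by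
        rw [← pvB'_zero image]
        rw [hi0] at h
        exact h.symm
      simp [hb0]
  have hA : (pvB' image j && decide (j + 1 < i + 1) && !(pvB' image (j + 1)))
      = (pvB' image j && decide (j + 1 < i) && !(pvB' image (j + 1))) := by
    by_cases h1 : j + 1 < i
    · rw [decide_eq_true h1, decide_eq_true (by omega : j + 1 < i + 1)]
    · by_cases h2 : j + 1 = i
      · have hi : 0 < i := by omega
        have hp : pvB' image j = pvB' image i := by
          unfold pvPrev at h; rw [if_neg (by omega)] at h
          rw [show i - 1 = j by omega] at h
          rw [← h]
        have hq : pvB' image (j + 1) = pvB' image i := by rw [h2]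
        rw [decide_eq_true (by omega : j + 1 < i + 1), decide_eq_false h1, hp, hq]
        cases pvB' image i <;> simp
      · rw [decide_eq_false (by omega : ¬ j + 1 < i + 1), decide_eq_false h1]
  have hB : (pvB' image j && decide (0 < j ∧ j < i + 1) && !(pvB' image (j - 1)))
      = (pvB' image j && decide (0 < j ∧ j < i) && !(pvB' image (j - 1))) := by
    by_cases h1 : j < i
    · have he : (0 < j ∧ j < i + 1) ↔ (0 < j ∧ j < i) := by
        constructor <;> (rintro ⟨a, b⟩; exact ⟨a, by omega⟩)
      rw [decide_eq_decide.mpr he]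
    · by_cases h2 : j = i
      · subst h2
        by_cases hj : 0 < j
        · have hp : pvB' image (j - 1) = pvB' image j := by
            unfold pvPrev at h; rw [if_neg (by omega)] at h; rw [← h]
          rw [decide_eq_true (by omega : 0 < j ∧ j < j + 1),
            decide_eq_false (by omega : ¬ (0 < j ∧ j < j)), hp]
          cases pvB' image j <;> simp
        · rw [decide_eq_false (by omega : ¬ (0 < j ∧ j < j + 1)),
            decide_eq_false (by omega : ¬ (0 < j ∧ j < j))]
      · rw [decide_eq_false (by omega : ¬ (0 < j ∧ j < i + 1)),
          decide_eq_false (by omega : ¬ (0 < j ∧ j < i))]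
  unfold pvZeroedBy
  rw [hA, hB, hC]

theorem pvZeroedBy_zero (image : List (List Int)) (j : Nat) :
    pvZeroedBy image 0 j = false := by
  simp [pvZeroedBy]

theorem pvZeroedBy_one_of_text (image : List (List Int)) (hb0 : pvB image 0 = false) (j : Nat) :
    pvZeroedBy image 1 j = decide (j = image.length - 1) := by
  unfold pvZeroedBy
  rw [decide_eq_false (by omega : ¬ j + 1 < 1), decide_eq_false (by omega : ¬ (0 < j ∧ j < 1)),
    decide_eq_decide.mpr (show (j = image.length - 1 ∧ 0 < 1) ↔ (j = image.length - 1) by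
      constructor; exact fun ⟨a, _⟩ => a; exact fun a => ⟨a, by omega⟩), hb0]
  cases decide (j = image.length - 1) <;> simp

theorem pvZeroedBy_text_new (image : List (List Int)) (i : Nat) (hi : 0 < i)
    (hprev : pvB' image (i - 1) = true) (hb : pvB' image i = false) :
    pvZeroedBy image (i + 1) (i - 1) = true := by
  unfold pvZeroedBy
  rw [show i - 1 + 1 = i by omega, decide_eq_true (by omega : i < i + 1), hprev, hb]
  simp

theorem pvZeroedBy_text_old (image : List (List Int)) (i : Nat) (hi : 0 < i)
    (hb : pvB' image i = false) (j : Nat) (hj : j ≠ i - 1) :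
    pvZeroedBy image (i + 1) j = pvZeroedBy image i j := by
  have hA : decide (j + 1 < i + 1) = decide (j + 1 < i) := by
    rw [decide_eq_decide.mpr (by omega : (j + 1 < i + 1) ↔ (j + 1 < i))]
  have hB : (pvB' image j && decide (0 < j ∧ j < i + 1) && !(pvB' image (j - 1)))
      = (pvB' image j && decide (0 < j ∧ j < i) && !(pvB' image (j - 1))) := by
    by_cases h1 : j < i
    · rw [decide_eq_decide.mpr (show (0 < j ∧ j < i + 1) ↔ (0 < j ∧ j < i) by
        constructor <;> (rintro ⟨a, b⟩; exact ⟨a, by omega⟩))]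
    · by_cases h2 : j = i
      · subst h2; rw [hb]; simp
      · rw [decide_eq_false (by omega : ¬ (0 < j ∧ j < i + 1)),
          decide_eq_false (by omega : ¬ (0 < j ∧ j < i))]
  have hC : decide (j = image.length - 1 ∧ 0 < i + 1) = decide (j = image.length - 1 ∧ 0 < i) := by
    rw [decide_eq_decide.mpr (show (j = image.length - 1 ∧ 0 < i + 1) ↔ (j = image.length - 1 ∧ 0 < i) by
      constructor <;> (rintro ⟨a, b⟩; exact ⟨a, by omega⟩))]
  unfold pvZeroedBy
  rw [hA, hB, hC]

theorem pvZeroedBy_blank_new (image : List (List Int)) (i : Nat) (hi : 0 < i)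
    (hprev : pvB' image (i - 1) = false) (hb : pvB' image i = true) :
    pvZeroedBy image (i + 1) i = true := by
  unfold pvZeroedBy
  rw [hprev, hb, decide_eq_true (show 0 < i ∧ i < i + 1 by omega)]
  simp

theorem pvZeroedBy_blank_old (image : List (List Int)) (i : Nat) (hi : 0 < i)
    (_hb : pvB' image i = true) (hprev : pvB' image (i - 1) = false) (j : Nat) (hj : j ≠ i) :
    pvZeroedBy image (i + 1) j = pvZeroedBy image i j := by
  have hA : (pvB' image j && decide (j + 1 < i + 1) && !(pvB' image (j + 1)))
      = (pvB' image j && decide (j + 1 < i) && !(pvB' image (j + 1))) := by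
    by_cases h1 : j + 1 < i
    · rw [decide_eq_true h1, decide_eq_true (by omega : j + 1 < i + 1)]
    · by_cases h2 : j + 1 = i
      · rw [show j = i - 1 by omega, hprev]
        simp
      · rw [decide_eq_false (by omega : ¬ j + 1 < i + 1), decide_eq_false h1]
  have hB : decide (0 < j ∧ j < i + 1) = decide (0 < j ∧ j < i) := by
    rw [decide_eq_decide.mpr (show (0 < j ∧ j < i + 1) ↔ (0 < j ∧ j < i) by
      constructor <;> (rintro ⟨a, b⟩; exact ⟨a, by omega⟩))]
  have hC : decide (j = image.length - 1 ∧ 0 < i + 1) = decide (j = image.length - 1 ∧ 0 < i) := by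
    rw [decide_eq_decide.mpr (show (j = image.length - 1 ∧ 0 < i + 1) ↔ (j = image.length - 1 ∧ 0 < i) by
      constructor <;> (rintro ⟨a, b⟩; exact ⟨a, by omega⟩))]
  unfold pvZeroedBy
  rw [hA, hB, hC]

theorem pvImgAt_congr (image : List (List Int)) (i i' : Nat)
    (hz : ∀ j, pvZeroedBy image i j = pvZeroedBy image i' j) :
    pvImgAt image i = pvImgAt image i' := by
  unfold pvImgAt
  apply List.map_congr_left
  intro j _
  rw [hz j]

theorem pvImgAt_set (image : List (List Int)) (i i' k : Nat) (_hk : k < image.length)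
    (hnew : pvZeroedBy image i' k = true)
    (hold : ∀ j, j ≠ k → pvZeroedBy image i' j = pvZeroedBy image i j) :
    (pvImgAt image i).set k (pvZerosRow image.headI.length) = pvImgAt image i' := by
  apply List.ext_getElem
  · simp [pvImgAt]
  · intro j h1 h2
    have hj : j < image.length := by simpa [pvImgAt] using h2
    rw [List.getElem_set]
    by_cases hjk : k = j
    · subst hjk
      simp only [pvImgAt, List.getElem_map, List.getElem_range, hnew, if_true]
    · rw [if_neg hjk]
      simp only [pvImgAt, List.getElem_map, List.getElem_range]
      rw [hold j (fun hh => hjk (hh ▸ rfl))]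

-- the A-side step lemma

theorem pvStep_eq (image : List (List Int)) (hne : image ≠ [])
    (hlen : ∀ i : Nat, i < image.length →
      (image.headI.length ≤ (image.getD i []).length ∨ ∃ px ∈ image.getD i [], px ≠ 255) ∨
      (i = image.length - 1 ∧ 1 < image.length ∧ ∃ px ∈ image.headI, px ≠ 255)) (i : Nat) (hi : i < image.length) :
    pvStepA image.headI.length (pvImgAt image i, pvPrev image i) (i : Int)
      = (pvImgAt image (i + 1), pvPrev image (i + 1)) := by
  unfold pvStepA
  simp only [pvReadBlank image hlen i hi]
  have hprev_succ : pvPrev image (i + 1) = pvB' image i := by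
    unfold pvPrev; rw [if_neg (by omega)]; norm_num
  by_cases heq : pvPrev image i = pvB' image i
  · rw [if_pos heq]
    rw [pvImgAt_congr image i (i + 1) (fun j => (pvZeroedBy_succ_of_eq image i heq j).symm)]
    rw [hprev_succ, ← heq]
  · rw [if_neg heq]
    cases hb : pvB' image i with
    | false =>
      rw [if_pos rfl]
      by_cases hi0 : i = 0
      · subst hi0
        have hb0 : pvB image 0 = false := by rw [← pvB'_zero image, hb]
        rw [show ((0:Nat):Int) - 1 = -1 by norm_num]
        rw [pySetD_neg_one _ (by
          simp only [pvImgAt]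
          intro hcon
          have := congrArg List.length hcon
          simp at this
          exact hne this) _]
        have hlen' : (pvImgAt image 0).length = image.length := by simp [pvImgAt]
        rw [hlen']
        rw [pvImgAt_set image 0 1 (image.length - 1)
          (by have := List.length_pos_iff.mpr hne; omega)
          (by rw [pvZeroedBy_one_of_text image hb0]; simp)
          (fun j hj => by
            rw [pvZeroedBy_one_of_text image hb0, pvZeroedBy_zero,
              decide_eq_false (by omega : ¬ j = image.length - 1)])]
        rw [hprev_succ, hb]
      · have hipos : 0 < i := by omega
        have hprev : pvB' image (i - 1) = true := by
          unfold pvPrev at heq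
          rw [if_neg (by omega)] at heq
          rw [hb] at heq
          cases hpb : pvB' image (i - 1)
          · rw [hpb] at heq; exact absurd rfl heq
          · rfl
        rw [show ((i:Nat):Int) - 1 = (((i - 1 : Nat)):Int) by omega]
        rw [PySem.List.pySetD_natCast]
        rw [pvImgAt_set image i (i + 1) (i - 1) (by omega)
          (pvZeroedBy_text_new image i hipos hprev hb)
          (fun j hj => pvZeroedBy_text_old image i hipos hb j hj)]
        rw [hprev_succ, hb]
    | true =>
      rw [if_neg (by simp)]
      have hipos : 0 < i := by
        by_contra hcon
        have : i = 0 := by omega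
        subst this
        unfold pvPrev at heq
        rw [if_pos rfl] at heq
        rw [hb] at heq
        exact heq rfl
      have hprev : pvB' image (i - 1) = false := by
        unfold pvPrev at heq
        rw [if_neg (by omega)] at heq
        rw [hb] at heq
        cases hpb : pvB' image (i - 1)
        · rfl
        · rw [hpb] at heq; exact absurd rfl heq
      rw [PySem.List.pySetD_natCast]
      rw [pvImgAt_set image i (i + 1) i hi
        (pvZeroedBy_blank_new image i hipos hprev hb)
        (fun j hj => pvZeroedBy_blank_old image i hipos hb hprev j hj)]
      rw [hprev_succ, hb]

theorem pvRange_empty (a : Int) : PySem.List.pyRange a a 1 = [] := by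
  apply List.eq_nil_iff_forall_not_mem.mpr
  intro x hx
  have := PySem.List.mem_pyRange_one.mp hx
  omega

theorem pvFold (image : List (List Int)) (hne : image ≠ [])
    (hlen : ∀ i : Nat, i < image.length →
      (image.headI.length ≤ (image.getD i []).length ∨ ∃ px ∈ image.getD i [], px ≠ 255) ∨
      (i = image.length - 1 ∧ 1 < image.length ∧ ∃ px ∈ image.headI, px ≠ 255)) :
    ∀ (k i : Nat), i + k = image.length →
      (PySem.List.pyRange (i : Int) (image.length : Int) 1).foldl
          (pvStepA image.headI.length) (pvImgAt image i, pvPrev image i)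
        = (pvImgAt image image.length, pvPrev image image.length) := by
  intro k
  induction k with
  | zero =>
    intro i hik
    rw [show i = image.length by omega, pvRange_empty]
    rfl
  | succ k' ih =>
    intro i hik
    have hi : i < image.length := by omega
    rw [PySem.List.pyRange_one_cons (by exact_mod_cast hi)]
    rw [List.foldl_cons, pvStep_eq image hne hlen i hi]
    rw [show ((i : Int) + 1) = (((i + 1 : Nat)) : Int) by push_cast; ring]
    exact ih (i + 1) (by omega)

theorem pvHead_len (image : List (List Int)) (hne : image ≠ []) :
    (PySem.List.pyGetD image 0 []).length = image.headI.length := by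
  cases image with
  | nil => exact absurd rfl hne
  | cons x xs => rw [PySem.List.pyGetD_zero_cons]; rfl

theorem pvA_eq_imgAt (image : List (List Int)) (hne : image ≠ [])
    (hlen : ∀ i : Nat, i < image.length →
      (image.headI.length ≤ (image.getD i []).length ∨ ∃ px ∈ image.getD i [], px ≠ 255) ∨
      (i = image.length - 1 ∧ 1 < image.length ∧ ∃ px ∈ image.headI, px ≠ 255)) :
    image_row_split image = pvImgAt image image.length := by
  unfold image_row_split
  simp only []
  rw [pvHead_len image hne]
  have h0 : (image, true) = (pvImgAt image 0, pvPrev image 0) := by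
    rw [pvImgAt_zero]; rfl
  rw [h0]
  rw [show (0 : Int) = ((0 : Nat) : Int) by norm_num]
  rw [pvFold image hne hlen image.length 0 (by omega)]

-- ===== B-side lemmas =====

theorem pvIsBlankB_eq (m : Nat) (img : List (List Int)) (row : Nat) :
    pvIsBlankB m img row = pvBlank m (PySem.List.pyGetD img (row : Int) []) := rfl

theorem pvBlank_zeros (m : Nat) (hm : 0 < m) : pvBlank m (pvZerosRow m) = false := by
  rw [pvZerosRow_eq, pvBlank_eq_take, List.take_replicate]
  cases m with
  | zero => omega
  | succ k => simp [List.replicate_succ]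

-- reading the current row from A's state: B's slice-based test agrees with pvB'
theorem pvReadB_self (image : List (List Int)) (i : Nat) (hi : i < image.length) :
    pvIsBlankB image.headI.length (pvImgAt image i) i = pvB' image i := by
  rw [pvIsBlankB_eq, pvImgAt_read image i hi]
  by_cases hc : i = image.length - 1 ∧ 0 < i ∧ pvB image 0 = false
  · rw [if_pos hc]
    have hb' : pvB' image i = false := by
      unfold pvB'; rw [if_pos ⟨hc.1, by omega, hc.2.2⟩]
    rw [hb', pvBlank_zeros _ (pvB_zero_false_pos image hc.2.2)]
  · rw [if_neg hc]
    unfold pvB' pvB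
    rw [if_neg]
    rintro ⟨h1, h2, h3⟩
    exact hc ⟨h1, by omega, h3⟩

-- re-reading row s just after the blank→text write at s
theorem pvReadB_after (image : List (List Int)) (s : Nat) (hs : s < image.length)
    (hprev : pvPrev image s = true) :
    pvIsBlankB image.headI.length (pvImgAt image (s + 1)) s = pvB' image s := by
  rw [pvIsBlankB_eq]
  have hiff : (s = image.length - 1 ∧ 0 < s + 1) ↔ s = image.length - 1 :=
    ⟨fun h => h.1, fun h => ⟨h, by omega⟩⟩
  have hz : pvZeroedBy image (s + 1) s = (decide (s = image.length - 1) && !(pvB image 0)) := by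
    unfold pvZeroedBy
    by_cases h0 : 0 < s
    · have hp : pvB' image (s - 1) = true := by
        unfold pvPrev at hprev; rw [if_neg (by omega)] at hprev; exact hprev
      simp [hp, show ¬ (s + 1 < s + 1) by omega, hiff]
    · have hs0 : s = 0 := by omega
      subst hs0
      simp [hiff]
  have hrow : PySem.List.pyGetD (pvImgAt image (s + 1)) (s : Int) [] =
      if pvZeroedBy image (s + 1) s then pvZerosRow image.headI.length else image.getD s [] := by
    rw [PySem.List.pyGetD_natCast, List.getD_eq_getElem?_getD,
      List.getElem?_eq_getElem (by simp [pvImgAt]; omega)]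
    simp [pvImgAt]
  rw [hrow, hz]
  by_cases hc : s = image.length - 1 ∧ pvB image 0 = false
  · have hcond : (decide (s = image.length - 1) && !(pvB image 0)) = true := by
      simp [hc.1, hc.2]
    rw [hcond]
    have hif : (if (true : Bool) = true then pvZerosRow image.headI.length
        else image.getD s []) = pvZerosRow image.headI.length := if_pos rfl
    rw [hif]
    have hb' : pvB' image s = false := by
      by_cases hn : 1 < image.length
      · unfold pvB'; rw [if_pos ⟨hc.1, hn, hc.2⟩]
      · have hn1 : image.length = 1 := by omega
        have hs0 : s = 0 := by omega
        rw [hs0, pvB'_zero]; exact hc.2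
    rw [hb', pvBlank_zeros _ (pvB_zero_false_pos image hc.2)]
  · have hcond : (decide (s = image.length - 1) && !(pvB image 0)) = false := by
      by_cases h1 : s = image.length - 1
      · have : pvB image 0 = true := by
          cases hb0 : pvB image 0
          · exact absurd ⟨h1, hb0⟩ hc
          · rfl
        rw [this]; simp
      · rw [decide_eq_false h1]; simp
    rw [hcond]
    simp only [Bool.false_eq_true, if_false]
    unfold pvB' pvB
    rw [if_neg]
    rintro ⟨h1, h2, h3⟩
    exact hc ⟨h1, h3⟩

theorem pvImgAt_succ_of_eq (image : List (List Int)) (i : Nat)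
    (h : pvPrev image i = pvB' image i) : pvImgAt image (i + 1) = pvImgAt image i :=
  pvImgAt_congr image (i + 1) i (fun j => pvZeroedBy_succ_of_eq image i h j)

-- the blank→text write (B's `image[row - 1] = [0] * column_length`)
theorem pvWriteAbove (image : List (List Int)) (hne : image ≠ []) (i : Nat)
    (hi : i < image.length) (hprev : pvPrev image i = true) (hb : pvB' image i = false) :
    PySem.List.pySetD (pvImgAt image i) ((i : Int) - 1)
      (List.replicate image.headI.length (0 : Int)) = pvImgAt image (i + 1) := by
  rw [← pvZerosRow_eq]
  by_cases hi0 : i = 0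
  · subst hi0
    have hb0 : pvB image 0 = false := by rw [← pvB'_zero image, hb]
    rw [show ((0:Nat):Int) - 1 = -1 by norm_num]
    rw [pySetD_neg_one _ (by
      simp only [pvImgAt]
      intro hcon
      have := congrArg List.length hcon
      simp at this
      exact hne this) _]
    have hlen' : (pvImgAt image 0).length = image.length := by simp [pvImgAt]
    rw [hlen']
    rw [pvImgAt_set image 0 1 (image.length - 1)
      (by have := List.length_pos_iff.mpr hne; omega)
      (by rw [pvZeroedBy_one_of_text image hb0]; simp)
      (fun j hj => by
        rw [pvZeroedBy_one_of_text image hb0, pvZeroedBy_zero,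
          decide_eq_false (by omega : ¬ j = image.length - 1)])]
  · have hipos : 0 < i := by omega
    have hprevB : pvB' image (i - 1) = true := by
      unfold pvPrev at hprev; rw [if_neg (by omega)] at hprev; exact hprev
    rw [show ((i:Nat):Int) - 1 = (((i - 1 : Nat)):Int) by omega]
    rw [PySem.List.pySetD_natCast]
    rw [pvImgAt_set image i (i + 1) (i - 1) (by omega)
      (pvZeroedBy_text_new image i hipos hprevB hb)
      (fun j hj => pvZeroedBy_text_old image i hipos hb j hj)]

-- the text→blank write (B's `image[row] = [0] * column_length`)
theorem pvWriteBelow (image : List (List Int)) (e : Nat) (he : e < image.length)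
    (he0 : 0 < e) (hb : pvB' image e = true) (hprev : pvB' image (e - 1) = false) :
    PySem.List.pySetD (pvImgAt image e) ((e : Int))
      (List.replicate image.headI.length (0 : Int)) = pvImgAt image (e + 1) := by
  rw [← pvZerosRow_eq, PySem.List.pySetD_natCast]
  rw [pvImgAt_set image e (e + 1) e he
    (pvZeroedBy_blank_new image e he0 hprev hb)
    (fun j hj => pvZeroedBy_blank_old image e he0 hb hprev j hj)]

-- the inner while loop: advances through the text block without changing A's state
theorem pvConsume_spec (image : List (List Int)) :
    ∀ (d k : Nat), image.length - k ≤ d → 1 ≤ k → k ≤ image.length →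
      pvB' image (k - 1) = false →
      (k ≤ pvConsumeB image.headI.length image.length (pvImgAt image k) k ∧
       pvConsumeB image.headI.length image.length (pvImgAt image k) k ≤ image.length ∧
       pvImgAt image (pvConsumeB image.headI.length image.length (pvImgAt image k) k) = pvImgAt image k ∧
       pvB' image (pvConsumeB image.headI.length image.length (pvImgAt image k) k - 1) = false ∧
       (pvConsumeB image.headI.length image.length (pvImgAt image k) k < image.length →
         pvB' image (pvConsumeB image.headI.length image.length (pvImgAt image k) k) = true)) := by
  intro d
  induction d with
  | zero =>
    intro k hd h1 h2 hprev
    have hk : k = image.length := by omega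
    rw [pvConsumeB, if_neg (by omega : ¬ (k < image.length ∧ pvIsBlankB image.headI.length (pvImgAt image k) k = false))]
    exact ⟨le_refl _, h2, rfl, hprev, fun h => absurd h (by omega)⟩
  | succ d' ih =>
    intro k hd h1 h2 hprev
    by_cases hk : k < image.length
    · cases hb : pvB' image k with
      | true =>
        rw [pvConsumeB, if_neg (by
          rintro ⟨_, hread⟩
          rw [pvReadB_self image k hk, hb] at hread
          exact Bool.true_eq_false.mp hread)]
        exact ⟨le_refl _, h2, rfl, hprev, fun _ => hb⟩
      | false =>
        have hstep : pvImgAt image (k + 1) = pvImgAt image k := by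
          apply pvImgAt_succ_of_eq
          unfold pvPrev
          rw [if_neg (by omega), hprev, hb]
        rw [pvConsumeB, if_pos ⟨hk, by rw [pvReadB_self image k hk, hb]⟩]
        rw [← hstep]
        have hrec := ih (k + 1) (by omega) (by omega) (by omega) (by simpa using hb)
        exact ⟨by omega, hrec.2.1, by rw [hrec.2.2.1, hstep], hrec.2.2.2.1, hrec.2.2.2.2⟩
    · rw [pvConsumeB, if_neg (by omega : ¬ (k < image.length ∧ pvIsBlankB image.headI.length (pvImgAt image k) k = false))]
      exact ⟨le_refl _, h2, rfl, hprev, fun h => absurd h (by omega)⟩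

-- the outer while loop: from A's state after i steps it produces A's final image
theorem pvOuter_spec (image : List (List Int)) (hne : image ≠ []) :
    ∀ (d i : Nat), image.length - i ≤ d → i ≤ image.length → pvPrev image i = true →
      pvOuterB image.headI.length image.length (pvImgAt image i) i
        = pvImgAt image image.length := by
  intro d
  induction d with
  | zero =>
    intro i hd h2 _
    have : i = image.length := by omega
    rw [pvOuterB, dif_neg (by omega : ¬ i < image.length), this]
  | succ d' ih =>
    intro i hd h2 hprev
    by_cases hi : i < image.length
    · rw [pvOuterB, dif_pos hi]
      cases hb : pvB' image i with
      | true =>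
        rw [if_pos (by rw [pvReadB_self image i hi, hb])]
        have hstep : pvImgAt image (i + 1) = pvImgAt image i := by
          apply pvImgAt_succ_of_eq; rw [hprev, hb]
        rw [← hstep]
        exact ih (i + 1) (by omega) (by omega)
          (by unfold pvPrev; rw [if_neg (by omega)]; simpa using hb)
      | false =>
        rw [if_neg (by rw [pvReadB_self image i hi, hb]; simp)]
        rw [pvWriteAbove image hne i hi hprev hb]
        -- first iteration of the inner while: row i is still text
        rw [pvConsumeB, if_pos ⟨hi, by rw [pvReadB_after image i hi hprev, hb]⟩]
        have hcons := pvConsume_spec image (image.length - (i + 1)) (i + 1)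
          (le_refl _) (by omega) (by omega) (by simpa using hb)
        set e := pvConsumeB image.headI.length image.length (pvImgAt image (i + 1)) (i + 1) with he
        obtain ⟨hge, hle, himg, hpe, hbe⟩ := hcons
        by_cases hen : e < image.length
        · rw [dif_pos hen]
          have hbet : pvB' image e = true := hbe hen
          have hwr : PySem.List.pySetD (pvImgAt image (i + 1)) ((e : Int))
              (List.replicate image.headI.length (0 : Int)) = pvImgAt image (e + 1) := by
            rw [← himg]
            exact pvWriteBelow image e hen (by omega) hbet hpe
          rw [hwr]
          exact ih (e + 1) (by omega) (by omega)
            (by unfold pvPrev; rw [if_neg (by omega)]; simpa using hbet)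
        · rw [dif_neg hen]
          have hee : e = image.length := by omega
          rw [← himg, hee]
    · rw [pvOuterB, dif_neg hi]
      have : i = image.length := by omega
      rw [this]

theorem pvB_eq_imgAt (image : List (List Int)) (hne : image ≠ []) :
    image_row_split_alt image = pvImgAt image image.length := by
  have h := pvOuter_spec image hne image.length 0 (by omega) (by omega) rfl
  rw [pvImgAt_zero image] at h
  unfold image_row_split_alt
  simp only []
  rw [pvHead_len image hne]
  exact h

-- ===== VERDICT (by name: the statement is the Claim_ definition above) =====
theorem image_row_split_spec : Claim_equal_image_row_split := by
  intro image _ hpre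
  unfold Spec_image_row_split
  rw [pvA_eq_imgAt image hpre.1 hpre.2, pvB_eq_imgAt image hpre.1]
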